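-- pv_equiv track=rewrite | github.com/ipjaworld/LeBemMon-FE | scripts/add/add_crimsonwood_drops.py | find_item_id_by_name
-- ===== SOURCE A (Python) =====
-- from typing import Dict, List, Optional, Tuple
--
-- def find_item_id_by_name(item_name: str, item_data: List[Dict]) -> Optional[str]:
--     """item_data.json에서 아이템 이름으로 ID 찾기 (부분 일치 포함)"""
--     # 정확한 일치 먼저 시도
--     for item in item_data:
--         if item.get("name") == item_name:
--             return item["id"]
--
--     # 공백 제거 후 비교
--     item_name_no_space = item_name.replace(" ", "")
--     for item in item_data:
--         name = item.get("name", "")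
--         name_no_space = name.replace(" ", "")
--         if item_name_no_space == name_no_space:
--             return item["id"]
--
--     # 부분 일치 시도 (아이템 이름에 검색어가 포함되어 있는 경우)
--     for item in item_data:
--         name = item.get("name", "")
--         # 공백 제거 후 부분 일치
--         if item_name_no_space in name.replace(" ", "") or name.replace(" ", "") in item_name_no_space:
--             return item["id"]
--         # 원본으로도 부분 일치
--         if item_name in name or name in item_name:
--             return item["id"]
--
--     return None
-- ===== SOURCE B (Python) =====
-- def find_item_id_by_name(item_name, item_data):
--     """Single pass with three first-match slots (exact / space-insensitive / substring)."""
--     qns = item_name.replace(" ", "")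
--     exact = nospace = substr = None
--     for item in item_data:
--         name = item.get("name")
--         if exact is None and name == item_name:
--             exact = item
--         n = name if name is not None else ""
--         n_ns = n.replace(" ", "")
--         if nospace is None and qns == n_ns:
--             nospace = item
--         if substr is None and (qns in n_ns or n_ns in qns or item_name in n or n in item_name):
--             substr = item
--     chosen = exact if exact is not None else (nospace if nospace is not None else substr)
--     return chosen["id"] if chosen is not None else None
-- ===== Notes on version B (the rewrite author's own statement) =====
-- stated objective: alternative
-- what changed: A's three sequential full scans (exact, space-removed, substring) are replaced by a single pass over item_data that records, in three Optional slots, the first item satisfying each tier's test, picking the highest-priority slot afterwards.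
import Mathlib
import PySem

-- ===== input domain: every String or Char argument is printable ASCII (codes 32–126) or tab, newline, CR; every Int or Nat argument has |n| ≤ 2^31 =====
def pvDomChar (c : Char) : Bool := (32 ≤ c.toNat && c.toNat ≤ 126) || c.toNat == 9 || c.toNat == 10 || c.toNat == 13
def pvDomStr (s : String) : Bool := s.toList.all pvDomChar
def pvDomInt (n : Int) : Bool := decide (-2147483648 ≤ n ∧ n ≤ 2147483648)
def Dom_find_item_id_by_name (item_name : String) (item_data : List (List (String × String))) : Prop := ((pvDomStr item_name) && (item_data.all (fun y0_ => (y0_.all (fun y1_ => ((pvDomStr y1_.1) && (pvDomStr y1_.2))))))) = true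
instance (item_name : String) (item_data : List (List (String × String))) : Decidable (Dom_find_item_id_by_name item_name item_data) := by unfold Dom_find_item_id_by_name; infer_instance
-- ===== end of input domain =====

-- B replaces A's three sequential scans by a single pass keeping three first-match slots (alternative decomposition, same result).

-- shared primitives: dict access and space removal
def pvGet (d : List (String × String)) (k : String) : Option String := PySem.Dict.get? (PySem.Dict.mk d) k
def pvNoSpace (s : String) : String := PySem.Str.replace s " " ""

-- ===== PORT A =====
-- first loop: exact name match; 'some r' = early return with value r (r = item["id"]; none there = KeyError, excluded by Pre_)
def pvA_loop1 (item_name : String) : List (List (String × String)) → Option (Option String)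
  | [] => none
  | item :: rest =>
    if pvGet item "name" == some item_name then some (pvGet item "id")
    else pvA_loop1 item_name rest

-- second loop: space-removed equality
def pvA_loop2 (qns : String) : List (List (String × String)) → Option (Option String)
  | [] => none
  | item :: rest =>
    let name := (pvGet item "name").getD ""
    let name_no_space := pvNoSpace name
    if qns == name_no_space then some (pvGet item "id")
    else pvA_loop2 qns rest

-- third loop: substring match, two ifs as in A
def pvA_loop3 (item_name qns : String) : List (List (String × String)) → Option (Option String)
  | [] => none
  | item :: rest =>
    let name := (pvGet item "name").getD ""
    if PySem.Str.isIn qns (pvNoSpace name) || PySem.Str.isIn (pvNoSpace name) qns then some (pvGet item "id")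
    else if PySem.Str.isIn item_name name || PySem.Str.isIn name item_name then some (pvGet item "id")
    else pvA_loop3 item_name qns rest

def find_item_id_by_name (item_name : String) (item_data : List (List (String × String))) : Option String :=
  match pvA_loop1 item_name item_data with
  | some r => r
  | none =>
    let item_name_no_space := pvNoSpace item_name
    match pvA_loop2 item_name_no_space item_data with
    | some r => r
    | none =>
      match pvA_loop3 item_name item_name_no_space item_data with
      | some r => r
      | none => none

-- ===== PORT B =====
-- one pass, three slots: first exact match, first space-insensitive match, first (combined) substring match
def pvB_scan (q qns : String) :
    List (List (String × String)) →
    Option (List (String × String)) → Option (List (String × String)) → Option (List (String × String)) →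
    Option (List (String × String)) × Option (List (String × String)) × Option (List (String × String))
  | [], e, n, s => (e, n, s)
  | item :: rest, e, n, s =>
    let name := pvGet item "name"
    let e' := if e.isNone && (name == some q) then some item else e
    let nm := name.getD ""
    let nns := pvNoSpace nm
    let n' := if n.isNone && (qns == nns) then some item else n
    let s' := if s.isNone &&
        (PySem.Str.isIn qns nns || PySem.Str.isIn nns qns || PySem.Str.isIn q nm || PySem.Str.isIn nm q)
      then some item else s
    pvB_scan q qns rest e' n' s'

def find_item_id_by_name_alt (item_name : String) (item_data : List (List (String × String))) : Option String :=
  let qns := pvNoSpace item_name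
  let r := pvB_scan item_name qns item_data none none none
  let chosen :=
    match r.1 with
    | some d => some d
    | none =>
      match r.2.1 with
      | some d => some d
      | none => r.2.2
  match chosen with
  | some d => pvGet d "id"
  | none => none

-- ===== PRECONDITION & SPEC =====
-- the three per-item tier tests of the search (used by Pre_ and by the lemmas below)
def pvP1 (q : String) (d : List (String × String)) : Bool := pvGet d "name" == some q
def pvP2 (qns : String) (d : List (String × String)) : Bool := qns == pvNoSpace ((pvGet d "name").getD "")
def pvP3 (q qns : String) (d : List (String × String)) : Bool :=
  let nm := (pvGet d "name").getD ""
  PySem.Str.isIn qns (pvNoSpace nm) || PySem.Str.isIn (pvNoSpace nm) qns ||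
    PySem.Str.isIn q nm || PySem.Str.isIn nm q
def pvHasId (d : List (String × String)) : Bool := PySem.Dict.contains (PySem.Dict.mk d) "id"
-- Pre_ holds exactly when Python A returns normally: A raises KeyError iff the item it selects —
-- (the port equality below happens to hold even outside Pre_, where both ports encode the KeyError as none)
-- the first match of the highest non-empty tier (exact, then space-removed, then substring) — has no "id" key.
def pvPreB (q : String) (data : List (List (String × String))) : Bool :=
  match data.find? (pvP1 q) with
  | some d => pvHasId d
  | none =>
    match data.find? (pvP2 (pvNoSpace q)) with
    | some d => pvHasId d
    | none =>
      match data.find? (pvP3 q (pvNoSpace q)) with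
      | some d => pvHasId d
      | none => true
def Pre_find_item_id_by_name (item_name : String) (item_data : List (List (String × String))) : Prop :=
  pvPreB item_name item_data = true
instance (item_name : String) (item_data : List (List (String × String))) : Decidable (Pre_find_item_id_by_name item_name item_data) := by unfold Pre_find_item_id_by_name; infer_instance
def pvWitness_find_item_id_by_name : String × (List (List (String × String))) :=
  ("Red Apple", [[("name", "Blue Sword"), ("id", "1001")], [("name", "Red Apple"), ("id", "1002")]])

def Spec_find_item_id_by_name (item_name : String) (item_data : List (List (String × String))) (out : Option String) : Prop := out = find_item_id_by_name_alt item_name item_data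
instance (item_name : String) (item_data : List (List (String × String))) (out : Option String) : Decidable (Spec_find_item_id_by_name item_name item_data out) := by unfold Spec_find_item_id_by_name; infer_instance

-- ===== CLAIM (what is proved, stated in full; the proofs are below) =====
def Claim_equal_find_item_id_by_name : Prop := ∀ (item_name : String) (item_data : List (List (String × String))), Dom_find_item_id_by_name item_name item_data → Pre_find_item_id_by_name item_name item_data → Spec_find_item_id_by_name item_name item_data (find_item_id_by_name item_name item_data)

-- ===== LEMMAS AND PROOFS =====

theorem pvA_loop1_eq (q : String) (l : List (List (String × String))) :
    pvA_loop1 q l = (l.find? (pvP1 q)).map (fun d => pvGet d "id") := by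
  induction l with
  | nil => rfl
  | cons d rest ih =>
    simp only [pvA_loop1, List.find?, pvP1]
    cases h : (pvGet d "name" == some q) with
    | true => simp
    | false => simp [ih]

theorem pvA_loop2_eq (qns : String) (l : List (List (String × String))) :
    pvA_loop2 qns l = (l.find? (pvP2 qns)).map (fun d => pvGet d "id") := by
  induction l with
  | nil => rfl
  | cons d rest ih =>
    simp only [pvA_loop2, List.find?, pvP2]
    cases h : (qns == pvNoSpace ((pvGet d "name").getD "")) with
    | true => simp
    | false => simp [ih]

theorem pvA_loop3_eq (q qns : String) (l : List (List (String × String))) :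
    pvA_loop3 q qns l = (l.find? (pvP3 q qns)).map (fun d => pvGet d "id") := by
  induction l with
  | nil => rfl
  | cons d rest ih =>
    simp only [pvA_loop3, List.find?, pvP3]
    cases h1 : PySem.Str.isIn qns (pvNoSpace ((pvGet d "name").getD "")) <;>
      cases h2 : PySem.Str.isIn (pvNoSpace ((pvGet d "name").getD "")) qns <;>
      cases h3 : PySem.Str.isIn q ((pvGet d "name").getD "") <;>
      cases h4 : PySem.Str.isIn ((pvGet d "name").getD "") q <;>
      simp_all

theorem pvB_scan_eq (q qns : String) (l : List (List (String × String)))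
    (e n s : Option (List (String × String))) :
    pvB_scan q qns l e n s =
      (e.orElse (fun _ => l.find? (pvP1 q)),
       n.orElse (fun _ => l.find? (pvP2 qns)),
       s.orElse (fun _ => l.find? (pvP3 q qns))) := by
  induction l generalizing e n s with
  | nil => cases e <;> cases n <;> cases s <;> rfl
  | cons d rest ih =>
    simp only [pvB_scan, List.find?, pvP1, pvP2, pvP3]
    rw [ih]
    congr 1
    · cases e with
      | some x => simp
      | none => cases h : (pvGet d "name" == some q) <;> simp_all
    congr 1
    · cases n with
      | some x => simp
      | none => cases h : (qns == pvNoSpace ((pvGet d "name").getD "")) <;> simp_all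
    · cases s with
      | some x => simp
      | none =>
        cases h : (PySem.Str.isIn qns (pvNoSpace ((pvGet d "name").getD "")) ||
            PySem.Str.isIn (pvNoSpace ((pvGet d "name").getD "")) qns ||
            PySem.Str.isIn q ((pvGet d "name").getD "") ||
            PySem.Str.isIn ((pvGet d "name").getD "") q) <;> simp_all

-- ===== VERDICT (by name: the statement is the Claim_ definition above) =====
theorem find_item_id_by_name_spec : Claim_equal_find_item_id_by_name := by
  intro q data _ _
  unfold Spec_find_item_id_by_name
  unfold find_item_id_by_name find_item_id_by_name_alt
  simp only [pvA_loop1_eq, pvA_loop2_eq, pvA_loop3_eq, pvB_scan_eq]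
  simp only [Option.orElse]
  cases h1 : data.find? (pvP1 q) with
  | some d => simp
  | none =>
    cases h2 : data.find? (pvP2 (pvNoSpace q)) with
    | some d => simp
    | none =>
      cases h3 : data.find? (pvP3 q (pvNoSpace q)) with
      | some d => simp
      | none => simp
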